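-- pv_equiv track=rewrite | github.com/oli06/news_collector | pipelines/article_pipeline.py | stripString
-- ===== SOURCE A (Python) =====
-- def stripString(s):
--     if s.startswith('\n') or s.endswith('\n'):
--         return stripString(s.strip('\n'))
--     if s.startswith('\t') or s.endswith('\t'):
--         return stripString(s.strip('\t'))
--     if s.startswith('Von ') or s.startswith('von '):
--         return stripString(s[4:])
--     if s.startswith('und ') or s.startswith('Und '):
--         return stripString(s[4:])
--
--     return s.strip()
-- ===== SOURCE B (Python) =====
-- def stripString(s):
--     while True:
--         s = s.strip('\t\n')
--         if s[:4] in ('Von ', 'von ', 'und ', 'Und '):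
--             s = s[4:]
--         else:
--             return s.strip()
-- ===== Notes on version B (the rewrite author's own statement) =====
-- stated objective: simpler
-- what changed: A's four-branch self-recursion (a newline-strip, a tab-strip or a single prefix removal per call) is replaced by a flat loop that strips the whole tab/newline border with one combined strip call and tests the four German prefixes with a single membership check on the first four characters.
import Mathlib
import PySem

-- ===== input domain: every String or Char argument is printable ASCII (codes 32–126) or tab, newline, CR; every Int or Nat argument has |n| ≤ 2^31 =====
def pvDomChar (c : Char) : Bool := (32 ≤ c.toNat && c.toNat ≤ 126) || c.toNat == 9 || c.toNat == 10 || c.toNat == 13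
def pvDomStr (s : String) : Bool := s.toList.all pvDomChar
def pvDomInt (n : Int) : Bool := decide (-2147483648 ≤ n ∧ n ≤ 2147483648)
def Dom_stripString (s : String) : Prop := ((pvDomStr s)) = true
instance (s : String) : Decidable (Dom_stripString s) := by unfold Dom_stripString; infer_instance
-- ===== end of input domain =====

-- B replaces A's four recursive branches by one loop step: strip the whole '\t'/'\n' border
-- with a single strip('\t\n'), then test the four prefixes with one membership check on s[:4]
-- (objective: simpler decomposition, same cost).

-- ── helpers the ports need for termination (cited by name in decreasing_by) ──
theorem pvStripChars_eq (s chars : List Char) :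
    PySem.Chars.stripChars s chars
      = List.rdropWhile (fun c => chars.contains c) (List.dropWhile (fun c => chars.contains c) s) := by
  simp [PySem.Chars.stripChars, List.rdropWhile]

theorem pvLenDrop_le {α : Type} (p : α → Bool) (s : List α) :
    (List.dropWhile p s).length ≤ s.length :=
  (List.dropWhile_suffix p).length_le

theorem pvLenRdrop_le {α : Type} (p : α → Bool) (s : List α) :
    (List.rdropWhile p s).length ≤ s.length :=
  (List.rdropWhile_prefix p s).length_le

theorem pvLenStrip_le (s chars : List Char) :
    (PySem.Chars.stripChars s chars).length ≤ s.length := by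
  rw [pvStripChars_eq]
  exact le_trans (pvLenRdrop_le _ _) (pvLenDrop_le _ _)

theorem pvStartswith_single_iff (l : List Char) (c : Char) :
    PySem.Chars.startswith l [c] = true ↔ ∃ t, l = c :: t := by
  cases l with
  | nil => simp [PySem.Chars.startswith, List.isPrefixOf]
  | cons a t =>
      constructor
      · intro h
        have : c = a := by
          simpa [PySem.Chars.startswith, List.isPrefixOf] using h
        exact ⟨t, by rw [this]⟩
      · rintro ⟨t', ht'⟩
        cases ht'
        simp [PySem.Chars.startswith, List.isPrefixOf]

theorem pvEndswith_rev (l : List Char) (c : Char) :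
    PySem.Chars.startswith l.reverse [c] = PySem.Chars.endswith l [c] := by
  simp [PySem.Chars.startswith, PySem.Chars.endswith, List.isSuffixOf]

theorem pvStrip_lt (c : Char) (cs l : List Char) (hc : cs.contains c = true)
    (h : (PySem.Chars.startswith l [c] || PySem.Chars.endswith l [c]) = true) :
    (PySem.Chars.stripChars l cs).length < l.length := by
  rw [pvStripChars_eq]
  rcases Bool.or_eq_true_iff.mp h with h | h
  · obtain ⟨t, rfl⟩ := (pvStartswith_single_iff l c).mp h
    calc (List.rdropWhile (fun x => cs.contains x) (List.dropWhile (fun x => cs.contains x) (c :: t))).length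
        ≤ (List.dropWhile (fun x => cs.contains x) (c :: t)).length := pvLenRdrop_le _ _
      _ = (List.dropWhile (fun x => cs.contains x) t).length := by
          rw [List.dropWhile_cons_of_pos (by simpa using hc)]
      _ ≤ t.length := pvLenDrop_le _ _
      _ < (c :: t).length := by simp
  · rw [← pvEndswith_rev] at h
    obtain ⟨t, ht⟩ := (pvStartswith_single_iff l.reverse c).mp h
    have hnil : l ≠ [] := by
      intro h0; rw [h0] at ht; simp at ht
    have hx : List.dropWhile (fun x => cs.contains x) l <:+ l := List.dropWhile_suffix _
    rw [List.rdropWhile]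
    cases hxr : (List.dropWhile (fun x => cs.contains x) l).reverse with
    | nil =>
        simpa using List.length_pos_of_ne_nil hnil
    | cons b r =>
        have hpre : (List.dropWhile (fun x => cs.contains x) l).reverse <+: l.reverse :=
          List.reverse_prefix.mpr hx
        rw [hxr, ht] at hpre
        obtain ⟨u, hu⟩ := hpre
        have hb : b = c := by
          simp only [List.cons_append, List.cons.injEq] at hu
          exact hu.1
        subst hb
        have h1 : (List.dropWhile (fun x => cs.contains x) (b :: r)).length ≤ r.length := by
          rw [List.dropWhile_cons_of_pos (by simpa using hc)]
          exact pvLenDrop_le _ _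
        have h2 : r.length + 1 ≤ l.length := by
          have : (b :: r).length = (List.dropWhile (fun x => cs.contains x) l).length := by
            rw [← hxr]; simp
          have h3 := pvLenDrop_le (fun x => cs.contains x) l
          simp only [List.length_cons] at this
          omega
        calc (List.dropWhile (fun x => cs.contains x) (b :: r)).reverse.length
            = (List.dropWhile (fun x => cs.contains x) (b :: r)).length := by simp
          _ ≤ r.length := h1
          _ < l.length := by omega

theorem pvSlice_take (l : List Char) : PySem.Chars.slice l none (some 4) = l.take 4 := by
  rw [PySem.Chars.slice_eq_listSlice, PySem.List.slice_to _ (by norm_num)]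
  rfl

theorem pvSlice_drop (l : List Char) : PySem.Chars.slice l (some 4) none = l.drop 4 := by
  rw [PySem.Chars.slice_eq_listSlice, PySem.List.slice_from _ (by norm_num)]
  rfl

theorem pvStartswith_take4 (l p : List Char) (hp : p.length = 4) :
    PySem.Chars.startswith l p = true ↔ l.take 4 = p := by
  rw [PySem.Chars.startswith, List.isPrefixOf_iff_prefix, List.prefix_iff_eq_take, hp]
  exact ⟨fun h => h.symm, fun h => h.symm⟩

theorem pvDrop4_lt (l p : List Char) (hp : p.length = 4)
    (h : PySem.Chars.startswith l p = true) :
    (PySem.Chars.slice l (some 4) none).length < l.length := by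
  have h4 : 4 ≤ l.length := by
    have ht := (pvStartswith_take4 l p hp).mp h
    have hl : (l.take 4).length = 4 := by rw [ht, hp]
    simp [List.length_take] at hl
    omega
  rw [pvSlice_drop, List.length_drop]
  omega

def pvPrefixes : List (List Char) :=
  [['V','o','n',' '], ['v','o','n',' '], ['u','n','d',' '], ['U','n','d',' ']]

theorem pvT4 (l : List Char)
    (h : PySem.Chars.slice (PySem.Chars.stripChars l ['\t','\n']) none (some 4) ∈ pvPrefixes) :
    (PySem.Chars.slice (PySem.Chars.stripChars l ['\t','\n']) (some 4) none).length < l.length := by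
  rw [pvSlice_take] at h
  have h4 : 4 ≤ (PySem.Chars.stripChars l ['\t','\n']).length := by
    have hl : ((PySem.Chars.stripChars l ['\t','\n']).take 4).length = 4 := by
      simp only [pvPrefixes, List.mem_cons, List.not_mem_nil, or_false] at h
      rcases h with h | h | h | h <;> rw [h] <;> rfl
    simp [List.length_take] at hl
    omega
  have hle := pvLenStrip_le l ['\t','\n']
  rw [pvSlice_drop, List.length_drop]
  omega

-- ===== PORT A =====
def stripACore (l : List Char) : List Char :=
  if h1 : (PySem.Chars.startswith l ['\n'] || PySem.Chars.endswith l ['\n']) = true then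
    stripACore (PySem.Chars.stripChars l ['\n'])
  else if h2 : (PySem.Chars.startswith l ['\t'] || PySem.Chars.endswith l ['\t']) = true then
    stripACore (PySem.Chars.stripChars l ['\t'])
  else if h3 : (PySem.Chars.startswith l ['V','o','n',' '] || PySem.Chars.startswith l ['v','o','n',' ']) = true then
    stripACore (PySem.Chars.slice l (some 4) none)
  else if h4 : (PySem.Chars.startswith l ['u','n','d',' '] || PySem.Chars.startswith l ['U','n','d',' ']) = true then
    stripACore (PySem.Chars.slice l (some 4) none)
  else
    PySem.Chars.strip l
termination_by l.length
decreasing_by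
  · exact pvStrip_lt '\n' ['\n'] l (by decide) h1
  · exact pvStrip_lt '\t' ['\t'] l (by decide) h2
  · rcases Bool.or_eq_true_iff.mp h3 with h | h
    · exact pvDrop4_lt l _ rfl h
    · exact pvDrop4_lt l _ rfl h
  · rcases Bool.or_eq_true_iff.mp h4 with h | h
    · exact pvDrop4_lt l _ rfl h
    · exact pvDrop4_lt l _ rfl h

def stripString (s : String) : String := String.ofList (stripACore s.toList)

-- ===== PORT B =====
def stripBCore (l : List Char) : List Char :=
  let t := PySem.Chars.stripChars l ['\t','\n']
  if h : PySem.Chars.slice t none (some 4) ∈ pvPrefixes then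
    stripBCore (PySem.Chars.slice t (some 4) none)
  else
    PySem.Chars.strip t
termination_by l.length
decreasing_by
  exact pvT4 l h

def stripString_alt (s : String) : String := String.ofList (stripBCore s.toList)

-- ===== PRECONDITION & SPEC =====
def Spec_stripString (s : String) (out : String) : Prop := out = stripString_alt s
instance (s : String) (out : String) : Decidable (Spec_stripString s out) := by unfold Spec_stripString; infer_instance

-- ===== CLAIM (what is proved, stated in full; the proofs are below) =====
def Claim_equal_stripString : Prop := ∀ (s : String), Dom_stripString s → Spec_stripString s (stripString s)

-- ===== LEMMAS AND PROOFS =====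
set_option maxRecDepth 4000

-- dropping from the left commutes with dropping from the right
theorem pvDropWhile_rdropWhile_comm {α : Type} (p q : α → Bool) (l : List α) :
    List.dropWhile p (List.rdropWhile q l) = List.rdropWhile q (List.dropWhile p l) := by
  induction l with
  | nil => simp
  | cons a t ih =>
      cases hpa : p a with
      | false =>
          rw [List.dropWhile_cons_of_neg (by simp [hpa])]
          cases hr : List.rdropWhile q (a :: t) with
          | nil => simp
          | cons b r =>
              have hpre := List.rdropWhile_prefix q (a :: t)
              rw [hr] at hpre
              obtain ⟨u, hu⟩ := hpre
              have hb : b = a := by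
                simp only [List.cons_append, List.cons.injEq] at hu
                exact hu.1
              subst hb
              rw [List.dropWhile_cons_of_neg (by simp [hpa])]
      | true =>
          rw [List.dropWhile_cons_of_pos (by simp [hpa])]
          by_cases hz : List.rdropWhile q t = []
          · have hall : ∀ x ∈ t, q x := List.rdropWhile_eq_nil_iff.mp hz
            have h1 : List.rdropWhile q (a :: t) = if q a then [] else [a] := by
              rw [List.rdropWhile, List.reverse_cons, List.dropWhile_append]
              have hd : List.dropWhile q t.reverse = [] := by
                rw [List.dropWhile_eq_nil_iff]
                intro x hx; exact hall x (by simpa using hx)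
              rw [hd]
              cases hqa : q a <;> simp [List.dropWhile, hqa]
            have h2 : List.rdropWhile q (List.dropWhile p t) = [] := by
              rw [List.rdropWhile_eq_nil_iff]
              intro x hx
              exact hall x ((List.dropWhile_suffix p).subset hx)
            rw [h1, h2]
            cases hqa : q a <;> simp [List.dropWhile, hpa]
          · have h1 : List.rdropWhile q (a :: t) = a :: List.rdropWhile q t := by
              rw [List.rdropWhile, List.reverse_cons, List.dropWhile_append]
              have hne : (List.dropWhile q t.reverse).isEmpty = false := by
                rw [List.isEmpty_eq_false_iff]
                intro h0
                exact hz (by rw [List.rdropWhile, h0]; rfl)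
              rw [hne]
              simp [List.rdropWhile]
            rw [h1, List.dropWhile_cons_of_pos (by simp [hpa]), ih]

-- dropWhile by a smaller predicate then a larger one is just the larger one
theorem pvDropWhile_subset {α : Type} (p q : α → Bool) (h : ∀ x, q x = true → p x = true)
    (l : List α) : List.dropWhile p (List.dropWhile q l) = List.dropWhile p l := by
  induction l with
  | nil => simp
  | cons a t ih =>
      cases hq : q a with
      | false => rw [List.dropWhile_cons_of_neg (by simp [hq])]
      | true =>
          rw [List.dropWhile_cons_of_pos (by simp [hq]), ih,
            List.dropWhile_cons_of_pos (by simp [h a hq])]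

theorem pvRdropWhile_subset {α : Type} (p q : α → Bool) (h : ∀ x, q x = true → p x = true)
    (l : List α) : List.rdropWhile p (List.rdropWhile q l) = List.rdropWhile p l := by
  simp only [List.rdropWhile, List.reverse_reverse]
  rw [pvDropWhile_subset p q h]

-- stripping a sub-alphabet first does not change a strip by the full alphabet
theorem pvStripChars_absorb (l ds cs : List Char)
    (h : ∀ x, ds.contains x = true → cs.contains x = true) :
    PySem.Chars.stripChars (PySem.Chars.stripChars l ds) cs = PySem.Chars.stripChars l cs := by
  simp only [pvStripChars_eq]
  rw [pvDropWhile_rdropWhile_comm, pvDropWhile_subset _ _ h, pvRdropWhile_subset _ _ h]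

-- if neither end carries '\t' or '\n', strip('\t\n') is the identity
theorem pvDropTN_id (x : List Char)
    (ht : PySem.Chars.startswith x ['\t'] = false)
    (hn : PySem.Chars.startswith x ['\n'] = false) :
    List.dropWhile (fun c => (['\t','\n'] : List Char).contains c) x = x := by
  cases x with
  | nil => simp
  | cons a t =>
      have ha1 : a ≠ '\t' := by
        intro h0
        rw [(pvStartswith_single_iff (a :: t) '\t').mpr ⟨t, by rw [h0]⟩] at ht
        simp at ht
      have ha2 : a ≠ '\n' := by
        intro h0
        rw [(pvStartswith_single_iff (a :: t) '\n').mpr ⟨t, by rw [h0]⟩] at hn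
        simp at hn
      rw [List.dropWhile_cons_of_neg (by simp [ha1, ha2])]

theorem pvStripTN_id (l : List Char)
    (h1 : (PySem.Chars.startswith l ['\n'] || PySem.Chars.endswith l ['\n']) = false)
    (h2 : (PySem.Chars.startswith l ['\t'] || PySem.Chars.endswith l ['\t']) = false) :
    PySem.Chars.stripChars l ['\t','\n'] = l := by
  rw [Bool.or_eq_false_iff] at h1 h2
  rw [pvStripChars_eq, pvDropTN_id l h2.1 h1.1, List.rdropWhile,
    pvDropTN_id l.reverse (by rw [pvEndswith_rev]; exact h2.2) (by rw [pvEndswith_rev]; exact h1.2),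
    List.reverse_reverse]

-- B's loop only looks at the input through stripChars · ['\t','\n']
theorem pvBCore_congr (x y : List Char)
    (h : PySem.Chars.stripChars x ['\t','\n'] = PySem.Chars.stripChars y ['\t','\n']) :
    stripBCore x = stripBCore y := by
  conv_lhs => rw [stripBCore]
  conv_rhs => rw [stripBCore]
  rw [h]

theorem pvCore_eq (l : List Char) : stripACore l = stripBCore l := by
  generalize hn : l.length = n
  induction n using Nat.strong_induction_on generalizing l with
  | _ n ih =>
  subst hn
  rw [stripACore]
  split_ifs with h1 h2 h3 h4
  · rw [ih _ (pvStrip_lt '\n' ['\n'] l (by decide) h1) _ rfl]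
    exact pvBCore_congr _ _ (pvStripChars_absorb l ['\n'] ['\t','\n'] (by intro x hx; simp at hx; simp [hx]))
  · rw [ih _ (pvStrip_lt '\t' ['\t'] l (by decide) h2) _ rfl]
    exact pvBCore_congr _ _ (pvStripChars_absorb l ['\t'] ['\t','\n'] (by intro x hx; simp at hx; simp [hx]))
  all_goals have hid := pvStripTN_id l (by simpa using h1) (by simpa using h2)
  · rw [ih _ (by
        rcases Bool.or_eq_true_iff.mp h3 with h | h
        · exact pvDrop4_lt l _ rfl h
        · exact pvDrop4_lt l _ rfl h) _ rfl]
    conv_rhs => rw [stripBCore]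
    rw [hid]
    rw [dif_pos (by
      rw [pvSlice_take]
      rcases Bool.or_eq_true_iff.mp h3 with h | h
      · rw [(pvStartswith_take4 l _ rfl).mp h]; exact List.Mem.head _
      · rw [(pvStartswith_take4 l _ rfl).mp h]; exact List.Mem.tail _ (List.Mem.head _))]
  · rw [ih _ (by
        rcases Bool.or_eq_true_iff.mp h4 with h | h
        · exact pvDrop4_lt l _ rfl h
        · exact pvDrop4_lt l _ rfl h) _ rfl]
    conv_rhs => rw [stripBCore]
    rw [hid]
    rw [dif_pos (by
      rw [pvSlice_take]
      rcases Bool.or_eq_true_iff.mp h4 with h | h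
      · rw [(pvStartswith_take4 l _ rfl).mp h]; exact List.Mem.tail _ (List.Mem.tail _ (List.Mem.head _))
      · rw [(pvStartswith_take4 l _ rfl).mp h]; exact List.Mem.tail _ (List.Mem.tail _ (List.Mem.tail _ (List.Mem.head _))))]
  · conv_rhs => rw [stripBCore]
    rw [hid]
    rw [dif_neg (by
      rw [pvSlice_take]
      intro hmem
      simp only [pvPrefixes, List.mem_cons, List.not_mem_nil, or_false] at hmem
      rcases hmem with h | h | h | h
      · exact h3 (Bool.or_eq_true_iff.mpr (Or.inl ((pvStartswith_take4 l _ rfl).mpr h)))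
      · exact h3 (Bool.or_eq_true_iff.mpr (Or.inr ((pvStartswith_take4 l _ rfl).mpr h)))
      · exact h4 (Bool.or_eq_true_iff.mpr (Or.inl ((pvStartswith_take4 l _ rfl).mpr h)))
      · exact h4 (Bool.or_eq_true_iff.mpr (Or.inr ((pvStartswith_take4 l _ rfl).mpr h))))]

-- ===== VERDICT (by name: the statement is the Claim_ definition above) =====
theorem stripString_spec : Claim_equal_stripString := by
  intro s _
  unfold Spec_stripString stripString stripString_alt
  rw [pvCore_eq]
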